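-- pv_equiv track=rewrite | github.com/antonstattin/rigkitten | tools/meoweights/util.py | removeNamespaceFromString
-- ===== SOURCE A (Python) =====
-- def removeNamespaceFromString(val):
--     """ If name have a namespace, this func removes it
--
--         :param val: string to remove namespace from
--         :type val: str
--     """
--     tokens = val.split('|')
--     result = ''
--     for i, token in enumerate(tokens):
--         if i > 0:
--             result +="|"
--         result += token.split(":")[-1]
--     return result
-- ===== SOURCE B (Python) =====
-- def removeNamespaceFromString(val):
--     """ If name have a namespace, this func removes it
--
--         :param val: string to remove namespace from
--         :type val: str
--     """
--     out = []
--     seg = []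
--     for ch in val:
--         if ch == ':':
--             seg = []
--         elif ch == '|':
--             out += seg
--             out.append('|')
--             seg = []
--         else:
--             seg.append(ch)
--     out += seg
--     return ''.join(out)
-- ===== Notes on version B (the rewrite author's own statement) =====
-- stated objective: alternative
-- what changed: Replaces split-on-pipe / per-token split-on-colon / join with a single character-by-character scan that keeps a current-segment buffer, discards it on ':' and flushes it on '|'.
import Mathlib
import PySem

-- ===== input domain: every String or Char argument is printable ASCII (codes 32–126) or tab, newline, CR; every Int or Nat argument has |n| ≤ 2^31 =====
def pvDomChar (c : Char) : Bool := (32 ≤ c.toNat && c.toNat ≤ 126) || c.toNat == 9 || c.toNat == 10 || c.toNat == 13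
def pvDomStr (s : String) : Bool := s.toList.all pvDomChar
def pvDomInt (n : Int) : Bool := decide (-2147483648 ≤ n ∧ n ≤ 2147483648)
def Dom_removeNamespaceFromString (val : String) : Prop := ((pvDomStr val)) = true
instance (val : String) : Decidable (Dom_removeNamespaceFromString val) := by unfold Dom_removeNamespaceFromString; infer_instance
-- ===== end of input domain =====

-- B replaces A's split/loop/join with one character scan keeping a segment buffer (alternative decomposition, same cost).


-- ===== PORT A =====
-- tokens = val.split('|'); result = ''; for i, token in enumerate(tokens): …; return result
-- (strings handled on the List Char side; token.split(":")[-1] is pyGet? at index -1, always `some` since split is nonempty)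
def removeNamespaceFromString (val : String) : String :=
  let tokens := PySem.Chars.splitOn val.toList ['|']
  let result : List Char := []
  let result := (PySem.List.enumerate tokens 0).foldl
    (fun result p =>
      let result := if p.1 > 0 then result ++ ['|'] else result
      result ++ ((PySem.List.pyGet? (PySem.Chars.splitOn p.2 [':']) (-1)).getD []))
    result
  String.mk result

-- ===== PORT B =====
-- the loop of Source B: out/seg accumulators, one pass over the characters
def bGo : List Char → List Char → List Char → List Char
  | [], out, seg => out ++ seg
  | c :: cs, out, seg =>
    if c = ':' then bGo cs out []
    else if c = '|' then bGo cs (out ++ seg ++ ['|']) []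
    else bGo cs out (seg ++ [c])

def removeNamespaceFromString_alt (val : String) : String :=
  String.mk (bGo val.toList [] [])

-- ===== PRECONDITION & SPEC =====
def Spec_removeNamespaceFromString (val : String) (out : String) : Prop := out = removeNamespaceFromString_alt val
instance (val : String) (out : String) : Decidable (Spec_removeNamespaceFromString val out) := by unfold Spec_removeNamespaceFromString; infer_instance

-- ===== CLAIM (what is proved, stated in full; the proofs are below) =====
def Claim_equal_removeNamespaceFromString : Prop := ∀ (val : String), Dom_removeNamespaceFromString val → Spec_removeNamespaceFromString val (removeNamespaceFromString val)

-- ===== LEMMAS AND PROOFS =====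

def sp (d : Char) : List Char → List (List Char)
  | [] => [[]]
  | c :: cs => if c = d then [] :: sp d cs else ((c :: (sp d cs).headI) :: (sp d cs).tail)

theorem sp_ne_nil (d : Char) (l : List Char) : sp d l ≠ [] := by
  cases l with
  | nil => simp [sp]
  | cons c cs => simp only [sp]; split <;> simp

theorem splitOn_go_spec (d : Char) : ∀ fuel (l cur : List Char) (acc : List (List Char)),
    l.length ≤ fuel →
    PySem.Chars.splitOn.go [d] fuel l cur.reverse acc =
      acc.reverse ++ ((cur ++ (sp d l).headI) :: (sp d l).tail) := by
  intro fuel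
  induction fuel with
  | zero =>
    intro l cur acc h
    have : l = [] := List.length_eq_zero_iff.mp (Nat.le_zero.mp h)
    subst this
    simp [PySem.Chars.splitOn.go, sp]
  | succ n ih =>
    intro l cur acc h
    cases l with
    | nil => simp [PySem.Chars.splitOn.go, sp]
    | cons c cs =>
      rw [PySem.Chars.splitOn.go]
      by_cases hc : c = d
      · subst hc
        have hpre : [c].isPrefixOf (c :: cs) = true := by simp [List.isPrefixOf]
        simp only [hpre, if_pos]
        have hih := ih cs [] (cur :: acc) (by simpa using Nat.le_of_succ_le_succ h)
        simp only [List.reverse_nil] at hih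
        simp only [List.length_cons, List.length_nil, List.drop_succ_cons, List.drop_zero, List.reverse_reverse]
        rw [hih]
        simp only [sp, if_pos rfl, List.headI_cons, List.tail_cons, List.reverse_cons,
          List.nil_append]
        cases hsp : sp c cs with
        | nil => exact absurd hsp (sp_ne_nil c cs)
        | cons t ts => simp
      · have hpre : [d].isPrefixOf (c :: cs) = false := by
          simp [List.isPrefixOf]; exact fun h' => hc h'.symm
        simp only [hpre, Bool.false_eq_true, if_false]
        have := ih cs (cur ++ [c]) acc (by simpa using Nat.le_of_succ_le_succ h)
        simp only [List.reverse_append, List.reverse_singleton, List.singleton_append] at this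
        rw [this]
        simp [sp, hc]

theorem splitOn_eq_sp (d : Char) (l : List Char) :
    PySem.Chars.splitOn l [d] = ((sp d l).headI :: (sp d l).tail) := by
  have := splitOn_go_spec d (l.length + 1) l [] [] (by omega)
  simpa [PySem.Chars.splitOn] using this

theorem sp_headI (d : Char) (l : List Char) : (sp d l).headI = l.takeWhile (· ≠ d) := by
  induction l with
  | nil => simp [sp]
  | cons c cs ih =>
    by_cases hc : c = d
    · subst hc; simp [sp, List.takeWhile_cons]
    · simp [sp, hc, List.takeWhile_cons, ih]

theorem sp_tail_eq_nil_iff (d : Char) (l : List Char) : (sp d l).tail = [] ↔ d ∉ l := by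
  induction l with
  | nil => simp [sp]
  | cons c cs ih =>
    by_cases hc : c = d
    · subst hc
      simp only [sp, if_pos rfl, List.tail_cons]
      constructor
      · intro h; exact absurd h (sp_ne_nil c cs)
      · intro h; exact absurd (List.mem_cons_self) h
    · simp only [sp, if_neg hc, List.tail_cons, ih, List.mem_cons]
      constructor
      · intro h h'; rcases h' with h' | h'; exact hc h'.symm; exact h h'
      · intro h h'; exact h (Or.inr h')

def L (t : List Char) : List Char :=
  (PySem.List.pyGet? (PySem.Chars.splitOn t [':']) (-1)).getD []

theorem pyGet?_neg_one_getLast? {α : Type} (xs : List α) :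
    PySem.List.pyGet? xs (-1) = xs.getLast? := by
  cases xs with
  | nil => simp [PySem.List.pyGet?, PySem.List.pyIdx?]
  | cons x l =>
    simp only [PySem.List.pyGet?, PySem.List.pyIdx?]
    rw [if_neg (by norm_num), if_pos (by simp)]
    simp [List.getLast?_eq_getElem?]

theorem L_eq (t : List Char) :
    L t = (((sp ':' t).headI :: (sp ':' t).tail).getLast?).getD [] := by
  rw [L, splitOn_eq_sp, pyGet?_neg_one_getLast?]

theorem L_nil : L [] = [] := by simp [L_eq, sp]

theorem L_colon_cons (t : List Char) : L (':' :: t) = L t := by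
  rw [L_eq, L_eq]
  simp only [sp, if_pos rfl, List.headI_cons, List.tail_cons]
  cases hsp : sp ':' t with
  | nil => exact absurd hsp (sp_ne_nil ':' t)
  | cons h ts => simp [List.getLast?_cons]

theorem L_cons_of_ne (c : Char) (t : List Char) (hc : ¬ c = ':') :
    L (c :: t) = if ':' ∈ t then L t else c :: L t := by
  rw [L_eq, L_eq]
  simp only [sp, if_neg hc, List.headI_cons, List.tail_cons]
  by_cases hm : ':' ∈ t
  · have htail : (sp ':' t).tail ≠ [] := fun h =>
      ((sp_tail_eq_nil_iff ':' t).mp h) hm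
    rw [if_pos hm]
    cases hsp : sp ':' t with
    | nil => exact absurd hsp (sp_ne_nil ':' t)
    | cons h ts =>
      rw [hsp] at htail; simp only [List.tail_cons] at htail ⊢
      cases ts with
      | nil => exact absurd rfl htail
      | cons u us => simp [List.getLast?_cons]
  · have htail : (sp ':' t).tail = [] := (sp_tail_eq_nil_iff ':' t).mpr hm
    rw [if_neg hm, htail]
    simp

def F : List Char → List Char
  | [] => []
  | c :: cs =>
    if c = '|' then '|' :: F cs
    else if c = ':' ∨ ':' ∈ cs.takeWhile (· ≠ '|') then F cs
    else c :: F cs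

theorem bGo_spec : ∀ (l out seg : List Char),
    bGo l out seg = out ++ (if ':' ∈ l.takeWhile (· ≠ '|') then [] else seg) ++ F l := by
  intro l
  induction l with
  | nil => intro out seg; simp [bGo, F]
  | cons c cs ih =>
    intro out seg
    by_cases h1 : c = ':'
    · subst h1
      rw [show bGo (':' :: cs) out seg = bGo cs out [] from rfl, ih]
      simp [F, List.takeWhile_cons]
    · by_cases h2 : c = '|'
      · subst h2
        rw [show bGo ('|' :: cs) out seg = bGo cs (out ++ seg ++ ['|']) [] from rfl, ih]
        simp [F, List.takeWhile_cons]
      · rw [show bGo (c :: cs) out seg = bGo cs out (seg ++ [c]) from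
          by simp [bGo, h1, h2], ih]
        have htw : (c :: cs).takeWhile (· ≠ '|') = c :: cs.takeWhile (· ≠ '|') := by
          simp [List.takeWhile_cons, h2]
        rw [htw]
        simp only [F, if_neg h2]
        by_cases hm : ':' ∈ cs.takeWhile (· ≠ '|')
        · have hc' : ¬ (':' : Char) = c := fun h => h1 (Eq.symm h)
          simp_all
        · have hor : ¬ (c = ':' ∨ ':' ∈ cs.takeWhile (· ≠ '|')) := by
            rintro (h | h); exact h1 h; exact hm h
          have hc' : ¬ (':' : Char) = c := fun h => h1 (Eq.symm h)
          simp_all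

theorem F_eq_sp (l : List Char) :
    F l = L ((sp '|' l).headI) ++ ((sp '|' l).tail).flatMap (fun t => '|' :: L t) := by
  induction l with
  | nil => simp [F, sp, L_nil]
  | cons c cs ih =>
    by_cases h2 : c = '|'
    · subst h2
      simp only [F, if_pos rfl, sp, List.headI_cons, List.tail_cons]
      cases hsp : sp '|' cs with
      | nil => exact absurd hsp (sp_ne_nil '|' cs)
      | cons h ts =>
        rw [hsp] at ih
        simp only [List.headI_cons, List.tail_cons] at ih
        simp [ih, L_nil]
    · simp only [sp, if_neg h2, List.headI_cons, List.tail_cons]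
      by_cases h1 : c = ':'
      · subst h1
        have hne : ¬ (':' : Char) = '|' := by decide
        simp only [F, if_neg hne, L_colon_cons]
        exact ih
      · rw [L_cons_of_ne c _ h1]
        rw [sp_headI]
        simp only [F, if_neg h2]
        by_cases hm : ':' ∈ cs.takeWhile (· ≠ '|')
        · simp only [if_pos hm, if_pos (Or.inr hm)]
          rw [ih, sp_headI]
        · have : ¬ (c = ':' ∨ ':' ∈ cs.takeWhile (· ≠ '|')) := by
            rintro (h | h); exact h1 h; exact hm h
          simp only [if_neg hm, if_neg this]
          rw [ih, sp_headI]
          simp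

theorem foldl_enum_spec : ∀ (ts : List (List Char)) (s : Int) (r : List Char), 1 ≤ s →
    (PySem.List.enumerate ts s).foldl
      (fun result p =>
        let result := if p.1 > 0 then result ++ ['|'] else result
        result ++ ((PySem.List.pyGet? (PySem.Chars.splitOn p.2 [':']) (-1)).getD [])) r
    = r ++ ts.flatMap (fun t => '|' :: L t) := by
  intro ts
  induction ts with
  | nil => intro s r _; simp [PySem.List.enumerate]
  | cons t ts ih =>
    intro s r hs
    rw [PySem.List.enumerate_cons, List.foldl_cons]
    simp only [show s > 0 from by omega, if_pos]
    rw [ih (s+1) _ (by omega)]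
    simp [L]


-- ===== VERDICT (by name: the statement is the Claim_ definition above) =====
theorem removeNamespaceFromString_spec : Claim_equal_removeNamespaceFromString := by
  intro val _
  unfold Spec_removeNamespaceFromString removeNamespaceFromString removeNamespaceFromString_alt
  rw [bGo_spec]
  simp only [List.nil_append, ite_self]
  rw [splitOn_eq_sp, PySem.List.enumerate_cons, List.foldl_cons]
  rw [foldl_enum_spec _ (0 + 1) _ (by omega), F_eq_sp]
  simp [L]
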